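-- pv_equiv track=rewrite | github.com/dabyeol/problem-solving | posts/solutions/boj/1992/code.py | f
-- ===== SOURCE A (Python) =====
-- def f(array, n=0, m=0, length=None):
--     if length is None:
--         length = len(array)
--
--     for i in range(n, n + length):
--         for j in range(m, m + length):
--             if array[i][j] != array[n][m]:
--                 length //= 2
--
--                 return (
--                     "("
--                     + f(array, n, m, length)
--                     + f(array, n, m + length, length)
--                     + f(array, n + length, m, length)
--                     + f(array, n + length, m + length, length)
--                     + ")"
--                 )
--
--     return array[n][m]
-- ===== SOURCE B (Python) =====
-- # Bottom-up quadtree: recurse into the four quadrants first, then merge equal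
-- # uniform quadrants, instead of A's top-down full-block uniformity scan.
-- def f(array, n=0, m=0, length=None):
--     if length is None:
--         length = len(array)
--     return _quad(array, n, m, length)[0]
--
--
-- def _quad(array, n, m, length):
--     # returns (encoding, value-if-the-block-is-uniform-else-None)
--     if length <= 1:
--         v = array[n][m]
--         return v, v
--     half = length // 2
--     e1, u1 = _quad(array, n, m, half)
--     e2, u2 = _quad(array, n, m + half, half)
--     e3, u3 = _quad(array, n + half, m, half)
--     e4, u4 = _quad(array, n + half, m + half, half)
--     if u1 is not None and u1 == u2 == u3 == u4:
--         return u1, u1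
--     return "(" + e1 + e2 + e3 + e4 + ")", None
-- ===== Notes on version B (the rewrite author's own statement) =====
-- stated objective: alternative
-- what changed: Replaces A's top-down full-block uniformity scan (recursing only after finding a mismatch) with an unconditional bottom-up quadtree recursion that merges four quadrants when they are all uniform with the same value.
-- outside the precondition, e.g. on f([['a', 'a', 'b'], ['a', 'a', 'b'], ['c', 'c', 'c']], 0, 0, 3): A returns '(aaaa)', B returns 'a'
import Mathlib
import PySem

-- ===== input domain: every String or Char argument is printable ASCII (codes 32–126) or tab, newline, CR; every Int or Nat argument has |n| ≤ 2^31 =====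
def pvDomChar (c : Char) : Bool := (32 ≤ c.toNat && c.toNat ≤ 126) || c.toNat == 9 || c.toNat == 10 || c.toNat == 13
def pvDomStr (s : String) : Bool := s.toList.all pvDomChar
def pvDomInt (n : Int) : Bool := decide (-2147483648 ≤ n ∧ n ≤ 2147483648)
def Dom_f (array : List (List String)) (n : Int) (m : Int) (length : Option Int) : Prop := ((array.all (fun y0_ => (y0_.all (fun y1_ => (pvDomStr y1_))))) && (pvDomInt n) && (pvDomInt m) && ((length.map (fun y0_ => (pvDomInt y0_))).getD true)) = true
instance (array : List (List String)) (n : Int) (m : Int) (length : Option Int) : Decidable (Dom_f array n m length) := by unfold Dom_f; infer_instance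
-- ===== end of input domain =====

-- B is a bottom-up quadtree (recurse first, merge equal uniform quadrants) instead of
-- A's top-down full-block scan; equivalence is claimed on power-of-2 (or empty) blocks.

-- ===== PORT A =====
-- array[i][j]; out-of-range (a Python IndexError, excluded by Pre_) defaults to "".
def cellA (array : List (List String)) (i j : Int) : String :=
  (PySem.List.pyGet? ((PySem.List.pyGet? array i).getD []) j).getD ""

-- A scans the whole block for a cell differing from array[n][m] (the early-return scan
-- depends only on whether such a cell exists); on a mismatch it recurses on the four
-- half-size quadrants.  The extra Nat argument is PURE FUEL for structural recursion
-- (each recursive call halves a positive L, so fuel L.toNat never runs out; at fuel 0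
-- the scanned range is empty and the no-mismatch branch's value is returned).
def fA (array : List (List String)) (n m L : Int) : Nat → String
  | 0 => cellA array n m
  | fuel+1 =>
    if ((PySem.List.pyRange n (n+L) 1).any fun i =>
         (PySem.List.pyRange m (m+L) 1).any fun j =>
           cellA array i j != cellA array n m) then
      let L' := PySem.Int.floordiv L 2
      "(" ++ fA array n m L' fuel ++ fA array n (m+L') L' fuel
          ++ fA array (n+L') m L' fuel ++ fA array (n+L') (m+L') L' fuel ++ ")"
    else
      cellA array n m

def f (array : List (List String)) (n : Int) (m : Int) (length : Option Int) : String :=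
  fA array n m (length.getD (array.length : Int)) (length.getD (array.length : Int)).toNat

-- ===== PORT B =====
-- returns (encoding, value-if-the-block-is-uniform-else-none); the Nat argument is
-- pure fuel as in fA (at fuel 0, L ≤ 0 and Python's length ≤ 1 base case applies).
def quadB (array : List (List String)) (n m L : Int) : Nat → String × Option String
  | 0 => (cellA array n m, some (cellA array n m))
  | fuel+1 =>
    if L ≤ 1 then
      (cellA array n m, some (cellA array n m))
    else
      let half := PySem.Int.floordiv L 2
      let q1 := quadB array n m half fuel
      let q2 := quadB array n (m + half) half fuel
      let q3 := quadB array (n + half) m half fuel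
      let q4 := quadB array (n + half) (m + half) half fuel
      if q1.2.isSome = true ∧ q1.2 = q2.2 ∧ q2.2 = q3.2 ∧ q3.2 = q4.2 then
        (q1.2.getD "", q1.2)
      else
        ("(" ++ q1.1 ++ q2.1 ++ q3.1 ++ q4.1 ++ ")", none)

def f_alt (array : List (List String)) (n : Int) (m : Int) (length : Option Int) : String :=
  (quadB array n m (length.getD (array.length : Int)) (length.getD (array.length : Int)).toNat).1

-- ===== PRECONDITION & SPEC =====
-- Pre_ excludes (a) effective lengths that are neither ≤ 0 nor a power of two — there
-- A's full-block scan sees cells the four quadrants do not cover, an artefact of the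
-- quadtree problem being posed for 2^k × 2^k inputs, so A's and B's values diverge —
-- and (b) index combinations on which A raises IndexError; uniform blocks (every cell
-- equal to array[n][m]) of any length stay inside Pre_, since both return that cell there.
def Pre_f (array : List (List String)) (n : Int) (m : Int) (length : Option Int) : Prop :=
  let L := length.getD (array.length : Int)
  (PySem.Raise.InRange array.length n ∧
   PySem.Raise.InRange ((PySem.List.pyGet? array n).getD []).length m ∧
   (0 < L → -(array.length : Int) ≤ n ∧ n + L ≤ (array.length : Int) ∧
     ∀ i ∈ PySem.List.pyRange n (n + L) 1,
       -(((PySem.List.pyGet? array i).getD []).length : Int) ≤ m ∧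
       m + L ≤ (((PySem.List.pyGet? array i).getD []).length : Int))) ∧
  ((0 < L ∧ L.toNat = 2 ^ Nat.log2 L.toNat) ∨ L ≤ 0 ∨
    ∀ i ∈ PySem.List.pyRange n (n + L) 1, ∀ j ∈ PySem.List.pyRange m (m + L) 1,
      (PySem.List.pyGet? ((PySem.List.pyGet? array i).getD []) j).getD "" =
      (PySem.List.pyGet? ((PySem.List.pyGet? array n).getD []) m).getD "")
instance (array : List (List String)) (n : Int) (m : Int) (length : Option Int) : Decidable (Pre_f array n m length) := by unfold Pre_f; infer_instance

def pvWitness_f : List (List String) × Int × Int × Option Int := ([["0", "1"], ["1", "0"]], 0, 0, none)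

def Spec_f (array : List (List String)) (n : Int) (m : Int) (length : Option Int) (out : String) : Prop := out = f_alt array n m length
instance (array : List (List String)) (n : Int) (m : Int) (length : Option Int) (out : String) : Decidable (Spec_f array n m length out) := by unfold Spec_f; infer_instance

-- ===== CLAIM (what is proved, stated in full; the proofs are below) =====
def Claim_equal_f : Prop := ∀ (array : List (List String)) (n : Int) (m : Int) (length : Option Int), Dom_f array n m length → Pre_f array n m length → Spec_f array n m length (f array n m length)

-- ===== LEMMAS AND PROOFS =====

-- the whole (possibly degenerate) block holds the same value as its top-left cell
def Unif (array : List (List String)) (n m L : Int) : Prop :=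
  ∀ i j : Int, n ≤ i → i < n + L → m ≤ j → j < m + L → cellA array i j = cellA array n m

theorem any_mismatch_iff (array : List (List String)) (n m L : Int) :
    (((PySem.List.pyRange n (n+L) 1).any fun i =>
       (PySem.List.pyRange m (m+L) 1).any fun j =>
         cellA array i j != cellA array n m) = true) ↔ ¬ Unif array n m L := by
  simp only [List.any_eq_true, PySem.List.mem_pyRange_one, bne_iff_ne, Unif]
  constructor
  · rintro ⟨i, hi, j, hj, hne⟩ hU
    exact hne (hU i j hi.1 hi.2 hj.1 hj.2)
  · intro h
    by_contra hc
    exact h fun i j h1 h2 h3 h4 => by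
      by_contra hne
      exact hc ⟨i, ⟨h1, h2⟩, j, ⟨h3, h4⟩, hne⟩

theorem unif_split (array : List (List String)) (n m H : Int) (hH : 1 ≤ H) :
    Unif array n m (2 * H) ↔
      Unif array n m H ∧ Unif array n (m + H) H ∧ Unif array (n + H) m H ∧
      Unif array (n + H) (m + H) H ∧
      cellA array n (m + H) = cellA array n m ∧
      cellA array (n + H) m = cellA array n m ∧
      cellA array (n + H) (m + H) = cellA array n m := by
  constructor
  · intro hU
    refine ⟨?_, ?_, ?_, ?_, ?_, ?_, ?_⟩
    · intro i j h1 h2 h3 h4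
      rw [hU i j (by omega) (by omega) (by omega) (by omega)]
    · intro i j h1 h2 h3 h4
      rw [hU i j (by omega) (by omega) (by omega) (by omega)]
      exact (hU n (m + H) (by omega) (by omega) (by omega) (by omega)).symm
    · intro i j h1 h2 h3 h4
      rw [hU i j (by omega) (by omega) (by omega) (by omega)]
      exact (hU (n + H) m (by omega) (by omega) (by omega) (by omega)).symm
    · intro i j h1 h2 h3 h4
      rw [hU i j (by omega) (by omega) (by omega) (by omega)]
      exact (hU (n + H) (m + H) (by omega) (by omega) (by omega) (by omega)).symm
    · exact hU n (m + H) (by omega) (by omega) (by omega) (by omega)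
    · exact hU (n + H) m (by omega) (by omega) (by omega) (by omega)
    · exact hU (n + H) (m + H) (by omega) (by omega) (by omega) (by omega)
  · rintro ⟨h1, h2, h3, h4, c2, c3, c4⟩ i j hi1 hi2 hj1 hj2
    by_cases hi : i < n + H <;> by_cases hj : j < m + H
    · exact h1 i j hi1 hi hj1 hj
    · rw [h2 i j hi1 hi (by omega) (by omega), c2]
    · rw [h3 i j (by omega) (by omega) hj1 hj, c3]
    · rw [h4 i j (by omega) (by omega) (by omega) (by omega), c4]

theorem two_pow_succ_halves (k : Nat) :
    PySem.Int.floordiv ((2:Int) ^ (k + 1)) 2 = 2 ^ k := by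
  rw [PySem.Int.floordiv_eq_ediv_of_pos (by omega : (0:Int) < 2), pow_succ]
  omega

theorem unif_sub (array : List (List String)) {n m L n' m' H : Int}
    (hU : Unif array n m L) (h1 : n ≤ n') (h2 : n' + H ≤ n + L)
    (h3 : m ≤ m') (h4 : m' + H ≤ m + L) (h5 : 1 ≤ H) :
    Unif array n' m' H ∧ cellA array n' m' = cellA array n m := by
  have hc : cellA array n' m' = cellA array n m :=
    hU n' m' (by omega) (by omega) (by omega) (by omega)
  refine ⟨fun i j g1 g2 g3 g4 => ?_, hc⟩
  rw [hU i j (by omega) (by omega) (by omega) (by omega), hc]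

theorem quadB_uniform_any (array : List (List String)) :
    ∀ (fuel : Nat) (n m L : Int), Unif array n m L →
      quadB array n m L fuel = (cellA array n m, some (cellA array n m)) := by
  intro fuel
  induction fuel with
  | zero => intro n m L _; rfl
  | succ g ih =>
    intro n m L hU
    by_cases hL : L ≤ 1
    · rw [quadB, if_pos hL]
    · have h2 : 2 ≤ L := by omega
      have hhalf : PySem.Int.floordiv L 2 = L / 2 :=
        PySem.Int.floordiv_eq_ediv_of_pos (by omega)
      have hb : 1 ≤ L / 2 ∧ L / 2 < L ∧ 2 * (L / 2) ≤ L := by omega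
      rw [quadB, if_neg hL]
      simp only [hhalf]
      obtain ⟨q1, c1⟩ := unif_sub array hU (le_refl n) (by omega) (le_refl m) (by omega) hb.1
      obtain ⟨q2, c2⟩ := unif_sub array hU (le_refl n) (by omega) (by omega : m ≤ m + L / 2) (by omega) hb.1
      obtain ⟨q3, c3⟩ := unif_sub array hU (by omega : n ≤ n + L / 2) (by omega) (le_refl m) (by omega) hb.1
      obtain ⟨q4, c4⟩ := unif_sub array hU (by omega : n ≤ n + L / 2) (by omega) (by omega : m ≤ m + L / 2) (by omega) hb.1
      rw [ih n m (L / 2) q1, ih n (m + L / 2) (L / 2) q2,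
          ih (n + L / 2) m (L / 2) q3, ih (n + L / 2) (m + L / 2) (L / 2) q4]
      simp [c2, c3, c4]

theorem quadB_not_uniform (array : List (List String)) :
    ∀ (k : Nat) (fuel : Nat) (n m : Int), k < fuel → ¬ Unif array n m (2 ^ k) →
      (quadB array n m (2 ^ k) fuel).2 = none := by
  intro k
  induction k with
  | zero =>
    intro fuel n m _ hU
    exfalso
    exact hU (fun i j h1 h2 h3 h4 => by
      have : i = n := by omega
      have : j = m := by omega
      subst_vars; rfl)
  | succ k ih =>
    intro fuel n m hf hU
    obtain ⟨g, rfl⟩ : ∃ g, fuel = g + 1 := ⟨fuel - 1, by omega⟩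
    have hkg : k < g := by omega
    have h2 : ¬ ((2:Int) ^ (k + 1) ≤ 1) := by
      have : (2:Int) ≤ 2 ^ (k + 1) := by
        calc (2:Int) = 2 ^ 1 := by norm_num
        _ ≤ 2 ^ (k + 1) := by exact pow_le_pow_right₀ (by omega) (by omega)
      omega
    rw [quadB, if_neg h2]
    simp only [two_pow_succ_halves]
    by_cases hcond : ((quadB array n m (2^k) g).2.isSome = true ∧
        (quadB array n m (2^k) g).2 = (quadB array n (m + 2^k) (2^k) g).2 ∧
        (quadB array n (m + 2^k) (2^k) g).2 = (quadB array (n + 2^k) m (2^k) g).2 ∧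
        (quadB array (n + 2^k) m (2^k) g).2 = (quadB array (n + 2^k) (m + 2^k) (2^k) g).2)
    · exfalso
      obtain ⟨hsome, e12, e23, e34⟩ := hcond
      have u1 : Unif array n m (2 ^ k) := by
        by_contra h; rw [ih g n m hkg h] at hsome; simp at hsome
      have u2 : Unif array n (m + 2^k) (2 ^ k) := by
        by_contra h; rw [ih g n (m + 2^k) hkg h] at e12; rw [e12] at hsome; simp at hsome
      have u3 : Unif array (n + 2^k) m (2 ^ k) := by
        by_contra h
        rw [ih g (n + 2^k) m hkg h] at e23; rw [e12, e23] at hsome; simp at hsome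
      have u4 : Unif array (n + 2^k) (m + 2^k) (2 ^ k) := by
        by_contra h
        rw [ih g (n + 2^k) (m + 2^k) hkg h] at e34
        rw [e12, e23, e34] at hsome; simp at hsome
      have q1 := quadB_uniform_any array g n m (2^k) u1
      have q2 := quadB_uniform_any array g n (m + 2^k) (2^k) u2
      have q3 := quadB_uniform_any array g (n + 2^k) m (2^k) u3
      have q4 := quadB_uniform_any array g (n + 2^k) (m + 2^k) (2^k) u4
      rw [q1, q2] at e12
      rw [q2, q3] at e23
      rw [q3, q4] at e34
      simp only [Option.some.injEq] at e12 e23 e34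
      apply hU
      rw [show (2:Int) ^ (k + 1) = 2 * 2 ^ k from by rw [pow_succ']]
      exact (unif_split array n m (2 ^ k) (one_le_pow₀ (by omega))).mpr
        ⟨u1, u2, u3, u4, e12.symm, (e12.trans e23).symm, (e12.trans (e23.trans e34)).symm⟩
    · rw [if_neg hcond]

-- A with any fuel on a uniform block: the scan finds no mismatch (or fuel is 0) and
-- the top-left cell is returned.
theorem fA_unif (array : List (List String)) (n m L : Int) (fuel : Nat)
    (hU : Unif array n m L) : fA array n m L fuel = cellA array n m := by
  cases fuel with
  | zero => rfl
  | succ g =>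
    rw [fA, if_neg (by rw [any_mismatch_iff]; exact not_not_intro hU)]

theorem fA_eq_quadB (array : List (List String)) :
    ∀ (k : Nat) (fuelA fuelB : Nat) (n m : Int), k < fuelA → k < fuelB →
      fA array n m (2 ^ k) fuelA = (quadB array n m (2 ^ k) fuelB).1 := by
  intro k
  induction k with
  | zero =>
    intro fuelA fuelB n m _ _
    have hU : Unif array n m (2 ^ 0) := fun i j h1 h2 h3 h4 => by
      have : i = n := by omega
      have : j = m := by omega
      subst_vars; rfl
    rw [fA_unif array n m _ fuelA hU, quadB_uniform_any array fuelB n m (2^0) hU]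
  | succ k ih =>
    intro fuelA fuelB n m hfA hfB
    obtain ⟨a, rfl⟩ : ∃ a, fuelA = a + 1 := ⟨fuelA - 1, by omega⟩
    obtain ⟨b, rfl⟩ : ∃ b, fuelB = b + 1 := ⟨fuelB - 1, by omega⟩
    have hka : k < a := by omega
    have hkb : k < b := by omega
    by_cases hU : Unif array n m (2 ^ (k + 1))
    · rw [fA_unif array n m _ (a+1) hU, quadB_uniform_any array (b+1) n m (2^(k+1)) hU]
    · -- A recurses; B's merge fails
      rw [fA, if_pos ((any_mismatch_iff array n m (2 ^ (k+1))).mpr hU)]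
      simp only [two_pow_succ_halves]
      have h2 : ¬ ((2:Int) ^ (k + 1) ≤ 1) := by
        have : (2:Int) ≤ 2 ^ (k + 1) := by
          calc (2:Int) = 2 ^ 1 := by norm_num
          _ ≤ 2 ^ (k + 1) := by exact pow_le_pow_right₀ (by omega) (by omega)
        omega
      have hmerge : ¬ ((quadB array n m (2^k) b).2.isSome = true ∧
          (quadB array n m (2^k) b).2 = (quadB array n (m + 2^k) (2^k) b).2 ∧
          (quadB array n (m + 2^k) (2^k) b).2 = (quadB array (n + 2^k) m (2^k) b).2 ∧
          (quadB array (n + 2^k) m (2^k) b).2 = (quadB array (n + 2^k) (m + 2^k) (2^k) b).2) := by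
        rintro ⟨hsome, e12, e23, e34⟩
        have u1 : Unif array n m (2 ^ k) := by
          by_contra h; rw [quadB_not_uniform array k b n m hkb h] at hsome; simp at hsome
        have u2 : Unif array n (m + 2^k) (2 ^ k) := by
          by_contra h
          rw [quadB_not_uniform array k b n (m + 2^k) hkb h] at e12
          rw [e12] at hsome; simp at hsome
        have u3 : Unif array (n + 2^k) m (2 ^ k) := by
          by_contra h
          rw [quadB_not_uniform array k b (n + 2^k) m hkb h] at e23
          rw [e12, e23] at hsome; simp at hsome
        have u4 : Unif array (n + 2^k) (m + 2^k) (2 ^ k) := by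
          by_contra h
          rw [quadB_not_uniform array k b (n + 2^k) (m + 2^k) hkb h] at e34
          rw [e12, e23, e34] at hsome; simp at hsome
        have q1 := quadB_uniform_any array b n m (2^k) u1
        have q2 := quadB_uniform_any array b n (m + 2^k) (2^k) u2
        have q3 := quadB_uniform_any array b (n + 2^k) m (2^k) u3
        have q4 := quadB_uniform_any array b (n + 2^k) (m + 2^k) (2^k) u4
        rw [q1, q2] at e12
        rw [q2, q3] at e23
        rw [q3, q4] at e34
        simp only [Option.some.injEq] at e12 e23 e34
        apply hU
        rw [show (2:Int) ^ (k + 1) = 2 * 2 ^ k from by rw [pow_succ']]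
        exact (unif_split array n m (2 ^ k) (one_le_pow₀ (by omega))).mpr
          ⟨u1, u2, u3, u4, e12.symm, (e12.trans e23).symm, (e12.trans (e23.trans e34)).symm⟩
      conv_rhs => rw [quadB, if_neg h2]
      simp only [two_pow_succ_halves, if_neg hmerge]
      rw [ih a b n m hka hkb, ih a b n (m + 2^k) hka hkb,
          ih a b (n + 2^k) m hka hkb, ih a b (n + 2^k) (m + 2^k) hka hkb]

-- ===== VERDICT (by name: the statement is the Claim_ definition above) =====
theorem f_spec : Claim_equal_f := by
  intro array n m length _hDom hPre
  unfold Spec_f f f_alt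
  obtain ⟨-, hpow⟩ := hPre
  rcases hpow with ⟨hpos, hk⟩ | hle | hunif
  · set K := Nat.log2 (length.getD (array.length : Int)).toNat with hK
    have hL : (length.getD (array.length : Int)) = ((2 ^ K : Nat) : Int) := by
      rw [← hk]; omega
    rw [hL]
    have hLN : (((2 ^ K : Nat) : Int)).toNat = 2 ^ K := by omega
    rw [hLN]
    have hcast : (((2 ^ K : Nat) : Int)) = (2:Int) ^ K := by push_cast; ring
    rw [hcast]
    exact fA_eq_quadB array K (2 ^ K) (2 ^ K) n m (Nat.lt_two_pow_self) (Nat.lt_two_pow_self)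
  · have hU : Unif array n m (length.getD (array.length : Int)) :=
      fun i j h1 h2 h3 h4 => by omega
    rw [fA_unif array n m _ _ hU, quadB_uniform_any array _ n m _ hU]
  · have hU : Unif array n m (length.getD (array.length : Int)) := by
      intro i j h1 h2 h3 h4
      exact hunif i (PySem.List.mem_pyRange_one.mpr ⟨h1, h2⟩)
        j (PySem.List.mem_pyRange_one.mpr ⟨h3, h4⟩)
    rw [fA_unif array n m _ _ hU, quadB_uniform_any array _ n m _ hU]
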